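-- pv_equiv track=rewrite | github.com/pokochy/JB-Pirate-King | s-c_test/snort_ais_ids_demo.py | _payload_to_bits
-- ===== SOURCE A (Python) =====
-- def _payload_to_bits(payload: str) -> list:
--     """6-bit ASCII 페이로드 → 비트 리스트"""
--     bits = []
--     for ch in payload:
--         val = ord(ch) - 48
--         if val > 40:
--             val -= 8
--         for b in range(5, -1, -1):
--             bits.append((val >> b) & 1)
--     return bits
-- ===== SOURCE B (Python) =====
-- def _payload_to_bits(payload: str) -> list:
--     """Pack all 6-bit values into one big integer, then emit its zero-padded binary string."""
--     acc = 0
--     for ch in payload: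
--         val = ord(ch) - 48
--         if val > 40:
--             val -= 8
--         acc = acc * 64 + (val & 63)
--     if not payload:
--         return []
--     return [int(d) for d in format(acc, '0%db' % (6 * len(payload)))]
-- ===== Notes on version B (the rewrite author's own statement) =====
-- stated objective: alternative
-- what changed: B packs all adjusted 6-bit values into one big integer (acc = acc*64 + (val&63)) and then produces the whole bit list at once from the integer's zero-padded binary string, instead of A's per-character inner loop of shifts and masks.
import Mathlib
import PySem

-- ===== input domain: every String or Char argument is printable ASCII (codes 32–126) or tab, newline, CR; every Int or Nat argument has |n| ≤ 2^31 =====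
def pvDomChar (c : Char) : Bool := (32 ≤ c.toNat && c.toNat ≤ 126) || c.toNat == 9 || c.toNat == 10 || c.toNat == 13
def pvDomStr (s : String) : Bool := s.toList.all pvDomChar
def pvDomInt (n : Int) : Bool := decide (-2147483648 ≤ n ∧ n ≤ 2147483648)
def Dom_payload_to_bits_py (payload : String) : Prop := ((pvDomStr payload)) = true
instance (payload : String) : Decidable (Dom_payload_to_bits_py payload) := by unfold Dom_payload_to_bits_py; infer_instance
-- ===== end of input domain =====

-- B packs the 6-bit values into one big integer and emits its zero-padded binary string, replacing A's per-character shift/mask loop (alternative algorithm, not claimed faster).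


-- ===== PORT A =====
def payload_to_bits_py (payload : String) : List Int :=
  payload.toList.foldl (fun bits ch =>
    let val0 : Int := (ch.toNat : Int) - 48
    let val : Int := if val0 > 40 then val0 - 8 else val0
    (PySem.List.pyRange 5 (-1) (-1)).foldl (fun bits b =>
      bits ++ [PySem.Int.band (val >>> b.toNat) 1]) bits) []

-- ===== PORT B =====
-- format(n, '0wb') ported by hand, exact for n ≥ 0: binary digits of n via Nat.digits (MSB first,
-- '0' for n = 0), left-padded with '0' to width w.
def pvFormatBin (w : Nat) (n : Nat) : List Char :=
  let ds := (Nat.digits 2 n).reverse.map (fun d => if d = 1 then '1' else '0')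
  let ds := if ds = [] then ['0'] else ds
  List.replicate (w - ds.length) '0' ++ ds

def payload_to_bits_py_alt (payload : String) : List Int :=
  let acc : Int := payload.toList.foldl (fun acc ch =>
    let val0 : Int := (ch.toNat : Int) - 48
    let val : Int := if val0 > 40 then val0 - 8 else val0
    acc * 64 + PySem.Int.band val 63) 0
  if payload.toList.length = 0 then []
  else
    -- [int(d) for d in format(acc, …)]: each d is '0' or '1', so ofStr? always returns a value here
    (pvFormatBin (6 * payload.toList.length) acc.toNat).map
      (fun c => (PySem.Int.ofStr? (String.ofList [c])).getD 0)

-- ===== PRECONDITION & SPEC =====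
def Spec_payload_to_bits_py (payload : String) (out : List Int) : Prop := out = payload_to_bits_py_alt payload
instance (payload : String) (out : List Int) : Decidable (Spec_payload_to_bits_py payload out) := by unfold Spec_payload_to_bits_py; infer_instance

-- ===== CLAIM (what is proved, stated in full; the proofs are below) =====
def Claim_equal_payload_to_bits_py : Prop := ∀ (payload : String), Dom_payload_to_bits_py payload → Spec_payload_to_bits_py payload (payload_to_bits_py payload)

-- ===== LEMMAS AND PROOFS =====

-- the adjusted per-character value, and its low six bits as a Nat
def pvAdj (ch : Char) : Int :=
  if (ch.toNat : Int) - 48 > 40 then (ch.toNat : Int) - 48 - 8 else (ch.toNat : Int) - 48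

def pvM (v : Int) : Nat := (PySem.Int.band v 63).toNat

-- A's 6-bit chunk for one character value
def pvChunkA (val : Int) : List Int :=
  (PySem.List.pyRange 5 (-1) (-1)).map (fun b => PySem.Int.band (val >>> b.toNat) 1)

-- the k low bits of m, LSB first
def pvLow : Nat → Nat → List Nat
  | 0, _ => []
  | k+1, m => m % 2 :: pvLow k (m / 2)

-- the six binary chars of m, MSB first (proof-side normal form of one chunk)
def pvChunk6 (m : Nat) : List Char := (pvLow 6 m).reverse.map (fun d => if d = 1 then '1' else '0')

def pvCInt (c : Char) : Int := (PySem.Int.ofStr? (String.ofList [c])).getD 0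

theorem pvAdj_bounds (ch : Char) (h : pvDomChar ch = true) : -39 ≤ pvAdj ch ∧ pvAdj ch ≤ 70 := by
  simp only [pvDomChar, Bool.or_eq_true, Bool.and_eq_true, decide_eq_true_eq, beq_iff_eq] at h
  unfold pvAdj
  split_ifs <;> omega

theorem pvChar_facts (v : Int) (h1 : -39 ≤ v) (h2 : v ≤ 70) :
    pvChunkA v = (pvChunk6 (pvM v)).map pvCInt ∧ pvM v < 64 ∧ PySem.Int.band v 63 = (pvM v : Int) := by
  interval_cases v <;> decide

theorem pvLow_zero (k : Nat) : pvLow k 0 = List.replicate k 0 := by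
  induction k with
  | zero => rfl
  | succ k ih => simp [pvLow, ih, List.replicate_succ]

-- pvLow k m = LSB-first digits of m padded with zeros to length k
theorem pvLow_eq_digits (k : Nat) : ∀ m : Nat, m < 2 ^ k →
    pvLow k m = Nat.digits 2 m ++ List.replicate (k - (Nat.digits 2 m).length) 0 := by
  induction k with
  | zero => intro m hm; interval_cases m; rfl
  | succ k ih =>
    intro m hm
    rcases Nat.eq_zero_or_pos m with rfl | hpos
    · simp [pvLow_zero]
    · rw [Nat.digits_def' (by norm_num) hpos]
      have h2 : 2 ^ (k + 1) = 2 * 2 ^ k := by ring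
      have hdiv : m / 2 < 2 ^ k := by omega
      simp only [pvLow, ih (m / 2) hdiv, List.length_cons]
      have he : k + 1 - ((Nat.digits 2 (m / 2)).length + 1) = k - (Nat.digits 2 (m / 2)).length := by omega
      simp [he]

-- shift lemma: multiplying by 64 and adding m < 64 prepends the six low bits on the digit side
theorem pvDigits_shift (a m : Nat) (ha : 1 ≤ a) (hm : m < 64) :
    Nat.digits 2 (a * 64 + m) = pvLow 6 m ++ Nat.digits 2 a := by
  have gen : ∀ k : Nat, ∀ m : Nat, m < 2 ^ k →
      Nat.digits 2 (a * 2 ^ k + m) = pvLow k m ++ Nat.digits 2 a := by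
    intro k
    induction k with
    | zero => intro m hm; interval_cases m; simp [pvLow]
    | succ k ih =>
      intro m hm
      have h2 : 2 ^ (k + 1) = 2 * 2 ^ k := by ring
      have hpow : 1 ≤ 2 ^ k := Nat.one_le_two_pow
      have he : a * 2 ^ (k + 1) + m = (a * 2 ^ k) * 2 + m := by rw [h2]; ring
      have hpos : 0 < a * 2 ^ (k + 1) + m := by nlinarith
      rw [Nat.digits_def' (by norm_num) hpos, he]
      have hdivm : m / 2 < 2 ^ k := by omega
      have hdiv : (a * 2 ^ k * 2 + m) / 2 = a * 2 ^ k + m / 2 := by omega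
      have hmod : (a * 2 ^ k * 2 + m) % 2 = m % 2 := by omega
      rw [hdiv, hmod, ih (m / 2) hdivm]
      simp [pvLow]
  have h64 : a * 64 + m = a * 2 ^ 6 + m := by norm_num
  rw [h64]; exact gen 6 m (by omega)

theorem pvFoldl_lt (l : List Nat) (h : ∀ m ∈ l, m < 64) :
    l.foldl (fun a m => a * 64 + m) 0 < 64 ^ l.length := by
  have gen : ∀ (l : List Nat), (∀ m ∈ l, m < 64) → ∀ (a C : Nat), a < C →
      l.foldl (fun a m => a * 64 + m) a < C * 64 ^ l.length := by
    intro l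
    induction l with
    | nil => intro _ a C h; simpa using h
    | cons x xs ih =>
      intro hmem a C haC
      have hx := hmem x (List.mem_cons_self ..)
      have step : a * 64 + x < C * 64 := by nlinarith
      have hrec := ih (fun m hm => hmem m (List.mem_cons_of_mem _ hm)) (a * 64 + x) (C * 64) step
      calc (x :: xs).foldl (fun a m => a * 64 + m) a
          = xs.foldl (fun a m => a * 64 + m) (a * 64 + x) := rfl
        _ < C * 64 * 64 ^ xs.length := hrec
        _ = C * 64 ^ (x :: xs).length := by simp [List.length_cons, pow_succ]; ring
  simpa using gen l h 0 1 (by norm_num)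

-- base chunk: the whole format pipeline for a single value m < 64
theorem pvFormatBin_base (m : Nat) (hm : m < 64) : pvFormatBin 6 m = pvChunk6 m := by
  interval_cases m <;> decide

theorem pvDigitsLen (k : Nat) : ∀ m : Nat, m < 2 ^ k → (Nat.digits 2 m).length ≤ k := by
  induction k with
  | zero => intro m hm; interval_cases m; simp
  | succ k ih =>
    intro m hm
    rcases Nat.eq_zero_or_pos m with rfl | hpos
    · simp
    · rw [Nat.digits_def' (by norm_num) hpos]
      have h2 : 2 ^ (k + 1) = 2 * 2 ^ k := by ring
      have := ih (m / 2) (by omega)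
      simpa using this

theorem pvFormatBin_zero (w : Nat) (hw : 1 ≤ w) : pvFormatBin w 0 = List.replicate w '0' := by
  unfold pvFormatBin
  simp only [Nat.digits_zero, List.reverse_nil, List.map_nil, if_true,
    List.length_cons, List.length_nil]
  rw [← List.replicate_succ' (n := w - 1) (a := '0')]
  congr 1
  omega

theorem pvFormatBin_pos (w m : Nat) (hm : 1 ≤ m) :
    pvFormatBin w m = List.replicate (w - (Nat.digits 2 m).length) '0' ++
      (Nat.digits 2 m).reverse.map (fun d => if d = 1 then '1' else '0') := by
  have hdne : Nat.digits 2 m ≠ [] := Nat.digits_ne_nil_iff_ne_zero.mpr (by omega)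
  unfold pvFormatBin
  simp [hdne, List.map_reverse]

-- pvChunk6 m is the padded reversed digit string of m
theorem pvChunk6_eq (m : Nat) (hm : m < 64) :
    pvChunk6 m = List.replicate (6 - (Nat.digits 2 m).length) '0' ++
      (Nat.digits 2 m).reverse.map (fun d => if d = 1 then '1' else '0') := by
  unfold pvChunk6
  rw [pvLow_eq_digits 6 m (by omega)]
  simp [List.reverse_append, List.map_replicate]

-- MAIN: the formatted accumulator is the concatenation of the per-character chunks
theorem pvFormatBin_foldl (ms : List Nat) (hm : ∀ m ∈ ms, m < 64) (hne : ms ≠ []) :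
    pvFormatBin (6 * ms.length) (ms.foldl (fun a m => a * 64 + m) 0) = ms.flatMap pvChunk6 := by
  induction ms using List.reverseRecOn with
  | nil => exact absurd rfl hne
  | append_singleton ms m ih =>
    by_cases hms : ms = []
    · subst hms
      have := pvFormatBin_base m (hm m (by simp))
      simpa using this
    · have hm' : ∀ x ∈ ms, x < 64 := fun x hx => hm x (by simp [hx])
      have hmlt : m < 64 := hm m (by simp)
      have ihe := ih hm' hms
      set a := ms.foldl (fun a m => a * 64 + m) 0 with ha
      have hfold : (ms ++ [m]).foldl (fun a m => a * 64 + m) 0 = a * 64 + m := by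
        simp [List.foldl_append, ha]
      have hn : 1 ≤ ms.length := List.length_pos_of_ne_nil hms
      have habound : a < 2 ^ (6 * ms.length) := by
        calc a < 64 ^ ms.length := pvFoldl_lt ms hm'
          _ = 2 ^ (6 * ms.length) := by rw [show (64:Nat) = 2 ^ 6 by norm_num, ← pow_mul]
      rw [hfold, List.flatMap_append, ← ihe]
      simp only [List.flatMap_cons, List.flatMap_nil, List.append_nil, List.length_append,
        List.length_singleton]
      have hw : 6 * (ms.length + 1) = 6 * ms.length + 6 := by ring
      rcases Nat.eq_zero_or_pos a with haz | hapos
      · -- accumulator still zero: the prefix is all zeros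
        rw [haz, Nat.zero_mul, Nat.zero_add, pvFormatBin_zero _ (by omega)]
        rcases Nat.eq_zero_or_pos m with rfl | hmpos
        · rw [pvFormatBin_zero _ (by omega), hw]
          have hc0 : pvChunk6 0 = List.replicate 6 '0' := by decide
          rw [hc0, ← List.replicate_add]
        · have hL : (Nat.digits 2 m).length ≤ 6 := pvDigitsLen 6 m (by omega)
          rw [pvFormatBin_pos _ m hmpos, pvChunk6_eq m hmlt, hw, ← List.append_assoc,
            ← List.replicate_add]
          congr 2
          omega
      · -- accumulator nonzero: the digit list splits off the six low bits
        have hLa : (Nat.digits 2 a).length ≤ 6 * ms.length := pvDigitsLen _ a habound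
        have hsplit := pvDigits_shift a m hapos hmlt
        have hLm : (Nat.digits 2 m).length ≤ 6 := pvDigitsLen 6 m (by omega)
        rw [pvFormatBin_pos _ _ (by omega), pvFormatBin_pos _ a hapos, pvChunk6_eq m hmlt, hsplit,
          pvLow_eq_digits 6 m (by omega)]
        simp only [List.reverse_append, List.map_append, List.map_replicate,
          List.reverse_replicate, List.length_append, List.length_replicate]
        rw [show 6 * (ms.length + 1) -
            ((Nat.digits 2 m).length + (6 - (Nat.digits 2 m).length) + (Nat.digits 2 a).length)
            = 6 * ms.length - (Nat.digits 2 a).length from by omega,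
          show (if (0:Nat) = 1 then '1' else '0') = '0' from rfl]
        simp [List.append_assoc]

-- the Int accumulator of port B equals the Nat accumulator over the 6-bit values
theorem pvAccCast (l : List Char) (h : ∀ c ∈ l, pvDomChar c = true) (a : Nat) :
    l.foldl (fun acc ch =>
        let val0 : Int := (ch.toNat : Int) - 48
        let val : Int := if val0 > 40 then val0 - 8 else val0
        acc * 64 + PySem.Int.band val 63) (a : Int)
      = (((l.map (fun ch => pvM (pvAdj ch))).foldl (fun a m => a * 64 + m) a : Nat) : Int) := by
  induction l generalizing a with
  | nil => rfl
  | cons c cs ih =>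
    simp only [List.foldl_cons, List.map_cons]
    have hb := pvAdj_bounds c (h c (List.mem_cons_self ..))
    have hband := (pvChar_facts (pvAdj c) hb.1 hb.2).2.2
    have hstep : (a : Int) * 64 + PySem.Int.band (pvAdj c) 63 = ((a * 64 + pvM (pvAdj c) : Nat) : Int) := by
      rw [hband]; push_cast; ring
    show cs.foldl _ ((a : Int) * 64 + PySem.Int.band (pvAdj c) 63) = _
    rw [hstep]
    exact ih (fun x hx => h x (List.mem_cons_of_mem _ hx)) _

theorem payload_to_bits_py_spec : Claim_equal_payload_to_bits_py := by
  intro payload hdom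
  unfold Spec_payload_to_bits_py payload_to_bits_py payload_to_bits_py_alt
  unfold Dom_payload_to_bits_py pvDomStr at hdom
  rw [List.all_eq_true] at hdom
  by_cases hl : payload.toList = []
  · simp [hl]
  · have hne : payload.toList ≠ [] := hl
    -- A side: fold with inner bit loop = flatMap of per-character chunks
    have houter : (fun (bits : List Int) ch =>
        let val0 : Int := (ch.toNat : Int) - 48
        let val : Int := if val0 > 40 then val0 - 8 else val0
        (PySem.List.pyRange 5 (-1) (-1)).foldl (fun bits b =>
          bits ++ [PySem.Int.band (val >>> b.toNat) 1]) bits)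
        = (fun bits ch => bits ++ pvChunkA (pvAdj ch)) := by
      funext bits ch
      show (PySem.List.pyRange 5 (-1) (-1)).foldl
        (fun bits b => bits ++ [PySem.Int.band ((pvAdj ch) >>> b.toNat) 1]) bits = _
      rw [PySem.List.foldl_append_singleton_eq_map]
      rfl
    rw [houter]
    have hA : payload.toList.foldl (fun bits ch => bits ++ pvChunkA (pvAdj ch)) []
        = payload.toList.flatMap (fun ch => pvChunkA (pvAdj ch)) := by
      simpa using PySem.List.foldl_append_eq_flatMap (fun ch => pvChunkA (pvAdj ch))
        (l := payload.toList) (acc := [])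
    rw [hA]
    have hcong : payload.toList.flatMap (fun ch => pvChunkA (pvAdj ch))
        = payload.toList.flatMap (fun ch => (pvChunk6 (pvM (pvAdj ch))).map pvCInt) := by
      apply List.flatMap_congr
      intro c hc
      have hb := pvAdj_bounds c (hdom c hc)
      exact (pvChar_facts (pvAdj c) hb.1 hb.2).1
    rw [hcong]
    -- B side
    have hlen0 : ¬ payload.toList.length = 0 := by simpa [List.length_eq_zero_iff] using hne
    simp only [if_neg hlen0]
    have hacc := pvAccCast payload.toList hdom 0
    simp only [Nat.cast_zero] at hacc
    rw [hacc, Int.toNat_natCast]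
    have hms : ∀ m ∈ payload.toList.map (fun ch => pvM (pvAdj ch)), m < 64 := by
      intro m hmm
      rcases List.mem_map.mp hmm with ⟨c, hc, rfl⟩
      have hb := pvAdj_bounds c (hdom c hc)
      exact (pvChar_facts (pvAdj c) hb.1 hb.2).2.1
    have hmsne : payload.toList.map (fun ch => pvM (pvAdj ch)) ≠ [] := by
      simpa using hne
    have hmain := pvFormatBin_foldl _ hms hmsne
    rw [List.length_map] at hmain
    rw [hmain, List.map_flatMap, List.flatMap_map]
    rfl
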